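-- pv_equiv track=rewrite | github.com/arthur-ball-dev/pcf-calculator | backend/services/data_ingestion/epa_ingestion.py | _categorize_material
-- ===== SOURCE A (Python) =====
-- def _categorize_material(material: str) -> str:
--     """
--     Categorize a material by type for grouping.
--
--     TASK-DATA-P10: Helper for _transform_materials_record.
--
--     Args:
--         material: Material name string
--
--     Returns:
--         Category string (e.g., "metals", "plastics", "paper", "electronics")
--     """
--     material_lower = material.lower()
--
--     # Metal materials
--     if any(m in material_lower for m in [
--         "aluminum", "steel", "copper", "metal", "iron"
--     ]):
--         return "metals"
--
--     # Plastic materials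
--     if any(p in material_lower for p in [
--         "hdpe", "ldpe", "pet", "lldpe", "pp", "ps", "pvc", "pla", "plastic"
--     ]):
--         return "plastics"
--
--     # Paper/cardboard
--     if any(p in material_lower for p in [
--         "paper", "corrugated", "magazine", "newspaper", "textbook", "phonebook"
--     ]):
--         return "paper"
--
--     # Electronics
--     if any(e in material_lower for e in [
--         "cpu", "display", "electronic", "peripheral", "device", "hard-copy"
--     ]):
--         return "electronics"
--
--     # Glass
--     if "glass" in material_lower or "fiberglass" in material_lower:
--         return "glass"
--
--     # Wood
--     if any(w in material_lower for w in [
--         "lumber", "fiberboard", "wood", "mdf"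
--     ]):
--         return "wood"
--
--     # Organics/food
--     if any(o in material_lower for o in [
--         "food", "beef", "poultry", "grain", "bread", "fruit", "vegetable",
--         "dairy", "yard", "grass", "leaves", "branch", "organic"
--     ]):
--         return "organics"
--
--     # Construction
--     if any(c in material_lower for c in [
--         "concrete", "asphalt", "drywall", "brick", "insulation", "vinyl",
--         "carpet", "shingle", "flooring"
--     ]):
--         return "construction"
--
--     # Rubber/tires
--     if "tire" in material_lower or "rubber" in material_lower:
--         return "rubber"
--
--     return "other"
-- ===== SOURCE B (Python) =====
-- # Different algorithm: instead of running a substring search for each keyword,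
-- # scan the text once position by position and hash-look-up each window
-- # (one per distinct keyword length) in a flat keyword -> (priority, category)
-- # dictionary, keeping the lowest-priority (i.e. earliest-rule) hit.
--
-- _RULE_ORDER = [
--     ("metals", ["aluminum", "steel", "copper", "metal", "iron"]),
--     ("plastics", ["hdpe", "ldpe", "pet", "lldpe", "pp", "ps", "pvc", "pla", "plastic"]),
--     ("paper", ["paper", "corrugated", "magazine", "newspaper", "textbook", "phonebook"]),
--     ("electronics", ["cpu", "display", "electronic", "peripheral", "device", "hard-copy"]),
--     ("glass", ["glass", "fiberglass"]),
--     ("wood", ["lumber", "fiberboard", "wood", "mdf"]),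
--     ("organics", ["food", "beef", "poultry", "grain", "bread", "fruit", "vegetable",
--                   "dairy", "yard", "grass", "leaves", "branch", "organic"]),
--     ("construction", ["concrete", "asphalt", "drywall", "brick", "insulation", "vinyl",
--                       "carpet", "shingle", "flooring"]),
--     ("rubber", ["tire", "rubber"]),
-- ]
--
-- _KEYWORDS = {kw: (pri, cat)
--              for pri, (cat, kws) in enumerate(_RULE_ORDER)
--              for kw in kws}
-- _LENGTHS = sorted({len(kw) for kw in _KEYWORDS})
--
--
-- def _categorize_material(material: str) -> str:
--     ml = material.lower()
--     best = None
--     for i in range(len(ml)):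
--         for length in _LENGTHS:
--             hit = _KEYWORDS.get(ml[i:i + length])
--             if hit is not None and (best is None or hit[0] < best[0]):
--                 best = hit
--     return best[1] if best is not None else "other"
-- ===== Notes on version B (the rewrite author's own statement) =====
-- stated objective: alternative
-- what changed: Replaced the nine ordered per-keyword substring searches with a single left-to-right scan of the text that hash-looks-up each window (one per distinct keyword length) in a flat keyword->(priority,category) dictionary and keeps the lowest-priority hit.
import Mathlib
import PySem

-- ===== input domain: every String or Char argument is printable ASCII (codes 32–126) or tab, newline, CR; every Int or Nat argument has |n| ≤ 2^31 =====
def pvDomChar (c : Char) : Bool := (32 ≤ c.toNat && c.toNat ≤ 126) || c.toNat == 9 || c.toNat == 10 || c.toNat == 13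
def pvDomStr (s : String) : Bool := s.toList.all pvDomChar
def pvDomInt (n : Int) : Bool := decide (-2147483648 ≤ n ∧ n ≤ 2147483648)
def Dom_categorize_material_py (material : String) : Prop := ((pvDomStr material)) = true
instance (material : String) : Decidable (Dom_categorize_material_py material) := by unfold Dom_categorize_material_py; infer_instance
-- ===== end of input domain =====

-- B replaces A's nine ordered per-keyword substring searches by a single left-to-right scan of
-- the text that looks each window (one per distinct keyword length) up in a flat
-- keyword -> (priority, category) dictionary and keeps the lowest-priority hit (alternative algorithm).


-- ===== PORT A =====
def categorize_material_py (material : String) : String :=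
  let material_lower := PySem.Str.lower material
  if ["aluminum", "steel", "copper", "metal", "iron"].any
      (fun m => PySem.Str.isIn m material_lower) then "metals"
  else if ["hdpe", "ldpe", "pet", "lldpe", "pp", "ps", "pvc", "pla", "plastic"].any
      (fun p => PySem.Str.isIn p material_lower) then "plastics"
  else if ["paper", "corrugated", "magazine", "newspaper", "textbook", "phonebook"].any
      (fun p => PySem.Str.isIn p material_lower) then "paper"
  else if ["cpu", "display", "electronic", "peripheral", "device", "hard-copy"].any
      (fun e => PySem.Str.isIn e material_lower) then "electronics"
  else if PySem.Str.isIn "glass" material_lower || PySem.Str.isIn "fiberglass" material_lower then "glass"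
  else if ["lumber", "fiberboard", "wood", "mdf"].any
      (fun w => PySem.Str.isIn w material_lower) then "wood"
  else if ["food", "beef", "poultry", "grain", "bread", "fruit", "vegetable",
           "dairy", "yard", "grass", "leaves", "branch", "organic"].any
      (fun o => PySem.Str.isIn o material_lower) then "organics"
  else if ["concrete", "asphalt", "drywall", "brick", "insulation", "vinyl",
           "carpet", "shingle", "flooring"].any
      (fun c => PySem.Str.isIn c material_lower) then "construction"
  else if PySem.Str.isIn "tire" material_lower || PySem.Str.isIn "rubber" material_lower then "rubber"
  else "other"

-- ===== PORT B =====
-- the flat keyword -> (priority, category) dictionary _KEYWORDS of Source B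
def pvKwList : List (String × (Int × String)) :=
  [("aluminum", ((0 : Int), "metals")), ("steel", (0, "metals")), ("copper", (0, "metals")),
   ("metal", (0, "metals")), ("iron", (0, "metals")),
   ("hdpe", (1, "plastics")), ("ldpe", (1, "plastics")), ("pet", (1, "plastics")),
   ("lldpe", (1, "plastics")), ("pp", (1, "plastics")), ("ps", (1, "plastics")),
   ("pvc", (1, "plastics")), ("pla", (1, "plastics")), ("plastic", (1, "plastics")),
   ("paper", (2, "paper")), ("corrugated", (2, "paper")), ("magazine", (2, "paper")),
   ("newspaper", (2, "paper")), ("textbook", (2, "paper")), ("phonebook", (2, "paper")),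
   ("cpu", (3, "electronics")), ("display", (3, "electronics")), ("electronic", (3, "electronics")),
   ("peripheral", (3, "electronics")), ("device", (3, "electronics")), ("hard-copy", (3, "electronics")),
   ("glass", (4, "glass")), ("fiberglass", (4, "glass")),
   ("lumber", (5, "wood")), ("fiberboard", (5, "wood")), ("wood", (5, "wood")), ("mdf", (5, "wood")),
   ("food", (6, "organics")), ("beef", (6, "organics")), ("poultry", (6, "organics")),
   ("grain", (6, "organics")), ("bread", (6, "organics")), ("fruit", (6, "organics")),
   ("vegetable", (6, "organics")), ("dairy", (6, "organics")), ("yard", (6, "organics")),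
   ("grass", (6, "organics")), ("leaves", (6, "organics")), ("branch", (6, "organics")),
   ("organic", (6, "organics")),
   ("concrete", (7, "construction")), ("asphalt", (7, "construction")), ("drywall", (7, "construction")),
   ("brick", (7, "construction")), ("insulation", (7, "construction")), ("vinyl", (7, "construction")),
   ("carpet", (7, "construction")), ("shingle", (7, "construction")), ("flooring", (7, "construction")),
   ("tire", (8, "rubber")), ("rubber", (8, "rubber"))]

def pvKw : PySem.Dict String (Int × String) := PySem.Dict.ofList pvKwList

-- the sorted distinct keyword lengths _LENGTHS of Source B
def pvLens : List Int := [2, 3, 4, 5, 6, 7, 8, 9, 10]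

-- 'if hit is not None and (best is None or hit[0] < best[0]): best = hit'
def pvUpd (best : Option (Int × String)) (hit : Int × String) : Option (Int × String) :=
  match best with
  | none => some hit
  | some b => if hit.1 < b.1 then some hit else some b

def categorize_material_py_alt (material : String) : String :=
  let ml := PySem.Str.lower material
  let best :=
    (PySem.List.pyRange 0 (PySem.Str.len ml) 1).foldl
      (fun best i =>
        pvLens.foldl
          (fun best L =>
            match PySem.Dict.get? pvKw (PySem.Str.slice ml (some i) (some (i + L))) with
            | none => best
            | some hit => pvUpd best hit)
          best)
      none
  match best with
  | some b => b.2
  | none => "other"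

-- ===== PRECONDITION & SPEC =====
def Spec_categorize_material_py (material : String) (out : String) : Prop := out = categorize_material_py_alt material
instance (material : String) (out : String) : Decidable (Spec_categorize_material_py material out) := by unfold Spec_categorize_material_py; infer_instance

-- ===== CLAIM (what is proved, stated in full; the proofs are below) =====
def Claim_equal_categorize_material_py : Prop := ∀ (material : String), Dom_categorize_material_py material → Spec_categorize_material_py material (categorize_material_py material)

-- ===== LEMMAS AND PROOFS =====

def pvCands (ml : String) : List (Int × String) :=
  (PySem.List.pyRange 0 (PySem.Str.len ml) 1).flatMap
    (fun i => pvLens.filterMap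
      (fun L => PySem.Dict.get? pvKw (PySem.Str.slice ml (some i) (some (i + L)))))

def pvPairs : List (Int × String) :=
  [(0, "metals"), (1, "plastics"), (2, "paper"), (3, "electronics"), (4, "glass"),
   (5, "wood"), (6, "organics"), (7, "construction"), (8, "rubber")]

set_option maxRecDepth 100000 in
lemma pvKw_eq : pvKw = PySem.Dict.mk pvKwList := by decide

-- B's nested loop is the fold of pvUpd over the flattened candidate list
lemma foldl_match_filterMap (g : Int → Option (Int × String)) :
    ∀ (ls : List Int) (b : Option (Int × String)),
      ls.foldl (fun b a => match g a with | none => b | some h => pvUpd b h) b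
        = (ls.filterMap g).foldl pvUpd b := by
  intro ls
  induction ls with
  | nil => intro b; rfl
  | cons a t ih =>
      intro b
      simp only [List.foldl_cons, List.filterMap_cons]
      cases hg : g a <;> simp [ih]

lemma alt_eq_fold (material : String) :
    categorize_material_py_alt material
      = (match (pvCands (PySem.Str.lower material)).foldl pvUpd none with
         | some b => b.2
         | none => "other") := by
  unfold categorize_material_py_alt pvCands
  rw [List.foldl_flatMap]
  simp only [foldl_match_filterMap]

-- minimality of the fold
lemma foldMin :
    ∀ (cs : List (Int × String)) (acc : Option (Int × String)) (x : Int × String),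
      cs.foldl pvUpd acc = some x →
        (x ∈ cs ∨ acc = some x) ∧ (∀ y ∈ cs, x.1 ≤ y.1) ∧ (∀ b, acc = some b → x.1 ≤ b.1) := by
  intro cs
  induction cs with
  | nil =>
      intro acc x h
      simp only [List.foldl_nil] at h
      exact ⟨Or.inr h, by simp, fun b hb => by rw [h] at hb; cases hb; exact le_refl _⟩
  | cons h t ih =>
      intro acc x hf
      simp only [List.foldl_cons] at hf
      obtain ⟨hmem, hmin, hacc⟩ := ih (pvUpd acc h) x hf
      have hupd : ∃ c, pvUpd acc h = some c ∧ c.1 ≤ h.1 ∧ (∀ b, acc = some b → c.1 ≤ b.1) := by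
        cases acc with
        | none => exact ⟨h, rfl, le_refl _, fun b hb => by cases hb⟩
        | some b =>
            by_cases hlt : h.1 < b.1
            · exact ⟨h, by simp [pvUpd, hlt], le_refl _, fun b' hb' => by cases hb'; omega⟩
            · exact ⟨b, by simp [pvUpd, hlt], by omega, fun b' hb' => by cases hb'; exact le_refl _⟩
      obtain ⟨c, hc, hch, hcb⟩ := hupd
      have hxc : x.1 ≤ c.1 := hacc c hc
      refine ⟨?_, ?_, ?_⟩
      · rcases hmem with hm | hm
        · exact Or.inl (List.mem_cons_of_mem _ hm)
        · rw [hc] at hm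
          cases hm
          cases acc with
          | none =>
              simp only [pvUpd] at hc
              cases hc
              exact Or.inl List.mem_cons_self
          | some b =>
              simp only [pvUpd] at hc
              split at hc
              · cases hc; exact Or.inl List.mem_cons_self
              · cases hc; exact Or.inr rfl
      · intro y hy
        rcases List.mem_cons.mp hy with rfl | hyt
        · exact le_trans hxc hch
        · exact hmin y hyt
      · intro b hb
        exact le_trans hxc (hcb b hb)

lemma fold_some_of_ne_nil :
    ∀ (cs : List (Int × String)) (b : Int × String), ∃ x, cs.foldl pvUpd (some b) = some x := by
  intro cs
  induction cs with
  | nil => intro b; exact ⟨b, rfl⟩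
  | cons h t ih =>
      intro b
      simp only [List.foldl_cons, pvUpd]
      split <;> apply ih

-- every hit in the dictionary lookup is an entry of the keyword table
lemma get?_mem :
    ∀ (l : List (String × (Int × String))) (kw : String) (v : Int × String),
      PySem.Dict.get? (PySem.Dict.mk l) kw = some v → (kw, v) ∈ l := by
  intro l
  induction l with
  | nil => intro kw v h; simp [PySem.Dict.get?] at h
  | cons p t ih =>
      intro kw v h
      obtain ⟨k, pv⟩ := p
      rw [PySem.Dict.get?_mk_cons] at h
      by_cases hk : (k == kw) = true
      · rw [if_pos hk] at h
        cases h
        have hkk : k = kw := eq_of_beq hk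
        subst hkk
        exact List.mem_cons_self
      · rw [if_neg hk] at h
        exact List.mem_cons_of_mem _ (ih kw v h)

set_option maxRecDepth 100000 in
lemma get?_of_mem_pvKw (kw : String) (v : Int × String) (h : (kw, v) ∈ pvKwList) :
    PySem.Dict.get? pvKw kw = some v := by
  rw [pvKw_eq]
  fin_cases h <;> decide

lemma kw_facts (kw : String) (v : Int × String) (h : (kw, v) ∈ pvKwList) :
    ((kw.toList.length : Int) ∈ pvLens) ∧ kw.toList ≠ [] := by
  fin_cases h <;> decide

lemma val_pairs (kw : String) (v : Int × String) (h : (kw, v) ∈ pvKwList) : v ∈ pvPairs := by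
  fin_cases h <;> decide

lemma pvLens_nonneg (L : Int) (h : L ∈ pvLens) : 0 ≤ L := by
  fin_cases h <;> decide

-- soundness: every candidate comes from a keyword that occurs in ml
lemma cands_elim (ml : String) (v : Int × String) (h : v ∈ pvCands ml) :
    ∃ kw, (kw, v) ∈ pvKwList ∧ PySem.Str.isIn kw ml = true := by
  unfold pvCands at h
  rw [List.mem_flatMap] at h
  obtain ⟨i, hi, hmem⟩ := h
  rw [List.mem_filterMap] at hmem
  obtain ⟨L, hL, hget⟩ := hmem
  rw [pvKw_eq] at hget
  refine ⟨PySem.Str.slice ml (some i) (some (i + L)), get?_mem _ _ _ hget, ?_⟩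
  have hi0 : 0 ≤ i := (PySem.List.mem_pyRange_one.mp hi).1
  have hL0 : 0 ≤ L := pvLens_nonneg L hL
  rw [PySem.Str.isIn_iff_infix, PySem.Str.toList_slice, PySem.Chars.slice_eq_listSlice,
      PySem.List.slice_toNat _ hi0 (by omega)]
  exact ((List.take_prefix _ _).isInfix).trans ((List.drop_suffix _ _).isInfix)

-- completeness: every keyword of the table that occurs in ml produces its candidate
lemma cands_intro (ml kw : String) (v : Int × String)
    (hmem : (kw, v) ∈ pvKwList) (hin : PySem.Str.isIn kw ml = true) : v ∈ pvCands ml := by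
  obtain ⟨hlen, hne⟩ := kw_facts kw v hmem
  rw [PySem.Str.isIn_eq] at hin
  obtain ⟨j, hj⟩ := (PySem.Chars.exists_prefix_drop_iff_isIn kw.toList ml.toList).mpr hin
  have hjlt : j < ml.toList.length := by
    by_contra hge
    rw [List.drop_eq_nil_of_le (by omega)] at hj
    exact hne (List.prefix_nil.mp hj)
  unfold pvCands
  rw [List.mem_flatMap]
  refine ⟨(j : Int), PySem.List.mem_pyRange_one.mpr ⟨by positivity, ?_⟩, ?_⟩
  · rw [PySem.Str.len_eq]; exact_mod_cast hjlt
  · rw [List.mem_filterMap]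
    refine ⟨(kw.toList.length : Int), hlen, ?_⟩
    have hslice : PySem.Str.slice ml (some (j : Int)) (some ((j : Int) + (kw.toList.length : Int))) = kw := by
      rw [← String.toList_inj, PySem.Str.toList_slice, PySem.Chars.slice_eq_listSlice,
          PySem.List.slice_toNat _ (by positivity) (by positivity)]
      have : ((j : Int) + (kw.toList.length : Int)).toNat - ((j : Int)).toNat = kw.toList.length := by
        omega
      rw [this]
      exact (List.prefix_iff_eq_take.mp hj).symm
    rw [hslice]
    exact get?_of_mem_pvKw kw v hmem

-- a category pair is a candidate iff one of its keywords occurs in ml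
lemma hM (ml : String) (k : Int) (ck : String) (gk : List String)
    (hgrp : ∀ kw, (kw, (k, ck)) ∈ pvKwList ↔ kw ∈ gk) :
    ((k, ck) ∈ pvCands ml) ↔ gk.any (fun kw => PySem.Str.isIn kw ml) = true := by
  constructor
  · intro h
    obtain ⟨kw, hmem, hin⟩ := cands_elim ml _ h
    exact List.any_eq_true.mpr ⟨kw, (hgrp kw).mp hmem, hin⟩
  · intro h
    obtain ⟨kw, hkg, hin⟩ := List.any_eq_true.mp h
    exact cands_intro ml kw _ ((hgrp kw).mpr hkg) hin

lemma grp0 (kw : String) : (kw, ((0 : Int), "metals")) ∈ pvKwList ↔ kw ∈ ["aluminum", "steel", "copper", "metal", "iron"] := by simp [pvKwList]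
lemma grp1 (kw : String) : (kw, ((1 : Int), "plastics")) ∈ pvKwList ↔ kw ∈ ["hdpe", "ldpe", "pet", "lldpe", "pp", "ps", "pvc", "pla", "plastic"] := by simp [pvKwList]
lemma grp2 (kw : String) : (kw, ((2 : Int), "paper")) ∈ pvKwList ↔ kw ∈ ["paper", "corrugated", "magazine", "newspaper", "textbook", "phonebook"] := by simp [pvKwList]
lemma grp3 (kw : String) : (kw, ((3 : Int), "electronics")) ∈ pvKwList ↔ kw ∈ ["cpu", "display", "electronic", "peripheral", "device", "hard-copy"] := by simp [pvKwList]
lemma grp4 (kw : String) : (kw, ((4 : Int), "glass")) ∈ pvKwList ↔ kw ∈ ["glass", "fiberglass"] := by simp [pvKwList]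
lemma grp5 (kw : String) : (kw, ((5 : Int), "wood")) ∈ pvKwList ↔ kw ∈ ["lumber", "fiberboard", "wood", "mdf"] := by simp [pvKwList]
lemma grp6 (kw : String) : (kw, ((6 : Int), "organics")) ∈ pvKwList ↔ kw ∈ ["food", "beef", "poultry", "grain", "bread", "fruit", "vegetable", "dairy", "yard", "grass", "leaves", "branch", "organic"] := by simp [pvKwList]
lemma grp7 (kw : String) : (kw, ((7 : Int), "construction")) ∈ pvKwList ↔ kw ∈ ["concrete", "asphalt", "drywall", "brick", "insulation", "vinyl", "carpet", "shingle", "flooring"] := by simp [pvKwList]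
lemma grp8 (kw : String) : (kw, ((8 : Int), "rubber")) ∈ pvKwList ↔ kw ∈ ["tire", "rubber"] := by simp [pvKwList]


lemma cands_sub (ml : String) : ∀ y ∈ pvCands ml, y ∈ pvPairs := by
  intro y hy
  obtain ⟨kw, hm, -⟩ := cands_elim ml y hy
  exact val_pairs kw y hm

lemma fold_total (cs : List (Int × String)) (h : cs ≠ []) :
    ∃ x, cs.foldl pvUpd none = some x := by
  cases cs with
  | nil => exact absurd rfl h
  | cons a t =>
      rw [List.foldl_cons]
      exact fold_some_of_ne_nil t a

lemma pick (cs : List (Int × String)) (k : Int) (ck : String)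
    (hsub : ∀ y ∈ cs, y ∈ pvPairs)
    (hmem : (k, ck) ∈ cs)
    (hno : ∀ y ∈ cs, k ≤ y.1)
    (hu : ∀ c, (k, c) ∈ pvPairs → c = ck) :
    (match cs.foldl pvUpd none with | some b => b.2 | none => "other") = ck := by
  obtain ⟨x, hx⟩ := fold_total cs (by intro h; subst h; cases hmem)
  obtain ⟨hxm, hxmin, -⟩ := foldMin cs none x hx
  rcases hxm with hxm | hxm
  swap
  · cases hxm
  have h1 : x.1 ≤ k := hxmin _ hmem
  have h2 : k ≤ x.1 := hno x hxm
  obtain ⟨p, c⟩ := x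
  have hxk : p = k := le_antisymm h1 h2
  subst hxk
  have hc : c = ck := hu c (hsub _ hxm)
  subst hc
  rw [hx]

lemma pv_main (material : String) :
    categorize_material_py material = categorize_material_py_alt material := by
  rw [alt_eq_fold]
  simp only [categorize_material_py]
  generalize PySem.Str.lower material = ml
  have m0 : ((((0:Int)), "metals") ∈ pvCands ml) ↔ (List.any ["aluminum", "steel", "copper", "metal", "iron"] (fun kw => PySem.Str.isIn kw ml)) = true := hM ml 0 "metals" _ grp0
  have m1 : ((((1:Int)), "plastics") ∈ pvCands ml) ↔ (List.any ["hdpe", "ldpe", "pet", "lldpe", "pp", "ps", "pvc", "pla", "plastic"] (fun kw => PySem.Str.isIn kw ml)) = true := hM ml 1 "plastics" _ grp1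
  have m2 : ((((2:Int)), "paper") ∈ pvCands ml) ↔ (List.any ["paper", "corrugated", "magazine", "newspaper", "textbook", "phonebook"] (fun kw => PySem.Str.isIn kw ml)) = true := hM ml 2 "paper" _ grp2
  have m3 : ((((3:Int)), "electronics") ∈ pvCands ml) ↔ (List.any ["cpu", "display", "electronic", "peripheral", "device", "hard-copy"] (fun kw => PySem.Str.isIn kw ml)) = true := hM ml 3 "electronics" _ grp3
  have m4 : ((((4:Int)), "glass") ∈ pvCands ml) ↔ (PySem.Str.isIn "glass" ml || PySem.Str.isIn "fiberglass" ml) = true := by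
    rw [hM ml 4 "glass" _ grp4]
    simp [List.any_cons, List.any_nil, Bool.or_false]
  have m5 : ((((5:Int)), "wood") ∈ pvCands ml) ↔ (List.any ["lumber", "fiberboard", "wood", "mdf"] (fun kw => PySem.Str.isIn kw ml)) = true := hM ml 5 "wood" _ grp5
  have m6 : ((((6:Int)), "organics") ∈ pvCands ml) ↔ (List.any ["food", "beef", "poultry", "grain", "bread", "fruit", "vegetable", "dairy", "yard", "grass", "leaves", "branch", "organic"] (fun kw => PySem.Str.isIn kw ml)) = true := hM ml 6 "organics" _ grp6
  have m7 : ((((7:Int)), "construction") ∈ pvCands ml) ↔ (List.any ["concrete", "asphalt", "drywall", "brick", "insulation", "vinyl", "carpet", "shingle", "flooring"] (fun kw => PySem.Str.isIn kw ml)) = true := hM ml 7 "construction" _ grp7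
  have m8 : ((((8:Int)), "rubber") ∈ pvCands ml) ↔ (PySem.Str.isIn "tire" ml || PySem.Str.isIn "rubber" ml) = true := by
    rw [hM ml 8 "rubber" _ grp8]
    simp [List.any_cons, List.any_nil, Bool.or_false]
  have hsub := cands_sub ml
  by_cases h0 : (List.any ["aluminum", "steel", "copper", "metal", "iron"] (fun kw => PySem.Str.isIn kw ml)) = true
  · rw [if_pos h0]
    refine (pick (pvCands ml) 0 "metals" hsub (m0.mpr h0) ?_ ?_).symm
    · intro y hy
      have hyp := hsub y hy
      simp only [pvPairs, List.mem_cons, List.not_mem_nil, or_false] at hyp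
      rcases hyp with rfl | rfl | rfl | rfl | rfl | rfl | rfl | rfl | rfl
      · norm_num
      · norm_num
      · norm_num
      · norm_num
      · norm_num
      · norm_num
      · norm_num
      · norm_num
      · norm_num
    · intro c hc
      simp only [pvPairs, List.mem_cons, List.not_mem_nil, or_false, Prod.mk.injEq] at hc
      norm_num at hc
      exact hc
  rw [if_neg h0]
  by_cases h1 : (List.any ["hdpe", "ldpe", "pet", "lldpe", "pp", "ps", "pvc", "pla", "plastic"] (fun kw => PySem.Str.isIn kw ml)) = true
  · rw [if_pos h1]
    refine (pick (pvCands ml) 1 "plastics" hsub (m1.mpr h1) ?_ ?_).symm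
    · intro y hy
      have hyp := hsub y hy
      simp only [pvPairs, List.mem_cons, List.not_mem_nil, or_false] at hyp
      rcases hyp with rfl | rfl | rfl | rfl | rfl | rfl | rfl | rfl | rfl
      · exact absurd (m0.mp hy) h0
      · norm_num
      · norm_num
      · norm_num
      · norm_num
      · norm_num
      · norm_num
      · norm_num
      · norm_num
    · intro c hc
      simp only [pvPairs, List.mem_cons, List.not_mem_nil, or_false, Prod.mk.injEq] at hc
      norm_num at hc
      exact hc
  rw [if_neg h1]
  by_cases h2 : (List.any ["paper", "corrugated", "magazine", "newspaper", "textbook", "phonebook"] (fun kw => PySem.Str.isIn kw ml)) = true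
  · rw [if_pos h2]
    refine (pick (pvCands ml) 2 "paper" hsub (m2.mpr h2) ?_ ?_).symm
    · intro y hy
      have hyp := hsub y hy
      simp only [pvPairs, List.mem_cons, List.not_mem_nil, or_false] at hyp
      rcases hyp with rfl | rfl | rfl | rfl | rfl | rfl | rfl | rfl | rfl
      · exact absurd (m0.mp hy) h0
      · exact absurd (m1.mp hy) h1
      · norm_num
      · norm_num
      · norm_num
      · norm_num
      · norm_num
      · norm_num
      · norm_num
    · intro c hc
      simp only [pvPairs, List.mem_cons, List.not_mem_nil, or_false, Prod.mk.injEq] at hc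
      norm_num at hc
      exact hc
  rw [if_neg h2]
  by_cases h3 : (List.any ["cpu", "display", "electronic", "peripheral", "device", "hard-copy"] (fun kw => PySem.Str.isIn kw ml)) = true
  · rw [if_pos h3]
    refine (pick (pvCands ml) 3 "electronics" hsub (m3.mpr h3) ?_ ?_).symm
    · intro y hy
      have hyp := hsub y hy
      simp only [pvPairs, List.mem_cons, List.not_mem_nil, or_false] at hyp
      rcases hyp with rfl | rfl | rfl | rfl | rfl | rfl | rfl | rfl | rfl
      · exact absurd (m0.mp hy) h0
      · exact absurd (m1.mp hy) h1
      · exact absurd (m2.mp hy) h2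
      · norm_num
      · norm_num
      · norm_num
      · norm_num
      · norm_num
      · norm_num
    · intro c hc
      simp only [pvPairs, List.mem_cons, List.not_mem_nil, or_false, Prod.mk.injEq] at hc
      norm_num at hc
      exact hc
  rw [if_neg h3]
  by_cases h4 : (PySem.Str.isIn "glass" ml || PySem.Str.isIn "fiberglass" ml) = true
  · rw [if_pos h4]
    refine (pick (pvCands ml) 4 "glass" hsub (m4.mpr h4) ?_ ?_).symm
    · intro y hy
      have hyp := hsub y hy
      simp only [pvPairs, List.mem_cons, List.not_mem_nil, or_false] at hyp
      rcases hyp with rfl | rfl | rfl | rfl | rfl | rfl | rfl | rfl | rfl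
      · exact absurd (m0.mp hy) h0
      · exact absurd (m1.mp hy) h1
      · exact absurd (m2.mp hy) h2
      · exact absurd (m3.mp hy) h3
      · norm_num
      · norm_num
      · norm_num
      · norm_num
      · norm_num
    · intro c hc
      simp only [pvPairs, List.mem_cons, List.not_mem_nil, or_false, Prod.mk.injEq] at hc
      norm_num at hc
      exact hc
  rw [if_neg h4]
  by_cases h5 : (List.any ["lumber", "fiberboard", "wood", "mdf"] (fun kw => PySem.Str.isIn kw ml)) = true
  · rw [if_pos h5]
    refine (pick (pvCands ml) 5 "wood" hsub (m5.mpr h5) ?_ ?_).symm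
    · intro y hy
      have hyp := hsub y hy
      simp only [pvPairs, List.mem_cons, List.not_mem_nil, or_false] at hyp
      rcases hyp with rfl | rfl | rfl | rfl | rfl | rfl | rfl | rfl | rfl
      · exact absurd (m0.mp hy) h0
      · exact absurd (m1.mp hy) h1
      · exact absurd (m2.mp hy) h2
      · exact absurd (m3.mp hy) h3
      · exact absurd (m4.mp hy) h4
      · norm_num
      · norm_num
      · norm_num
      · norm_num
    · intro c hc
      simp only [pvPairs, List.mem_cons, List.not_mem_nil, or_false, Prod.mk.injEq] at hc
      norm_num at hc
      exact hc
  rw [if_neg h5]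
  by_cases h6 : (List.any ["food", "beef", "poultry", "grain", "bread", "fruit", "vegetable", "dairy", "yard", "grass", "leaves", "branch", "organic"] (fun kw => PySem.Str.isIn kw ml)) = true
  · rw [if_pos h6]
    refine (pick (pvCands ml) 6 "organics" hsub (m6.mpr h6) ?_ ?_).symm
    · intro y hy
      have hyp := hsub y hy
      simp only [pvPairs, List.mem_cons, List.not_mem_nil, or_false] at hyp
      rcases hyp with rfl | rfl | rfl | rfl | rfl | rfl | rfl | rfl | rfl
      · exact absurd (m0.mp hy) h0
      · exact absurd (m1.mp hy) h1
      · exact absurd (m2.mp hy) h2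
      · exact absurd (m3.mp hy) h3
      · exact absurd (m4.mp hy) h4
      · exact absurd (m5.mp hy) h5
      · norm_num
      · norm_num
      · norm_num
    · intro c hc
      simp only [pvPairs, List.mem_cons, List.not_mem_nil, or_false, Prod.mk.injEq] at hc
      norm_num at hc
      exact hc
  rw [if_neg h6]
  by_cases h7 : (List.any ["concrete", "asphalt", "drywall", "brick", "insulation", "vinyl", "carpet", "shingle", "flooring"] (fun kw => PySem.Str.isIn kw ml)) = true
  · rw [if_pos h7]
    refine (pick (pvCands ml) 7 "construction" hsub (m7.mpr h7) ?_ ?_).symm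
    · intro y hy
      have hyp := hsub y hy
      simp only [pvPairs, List.mem_cons, List.not_mem_nil, or_false] at hyp
      rcases hyp with rfl | rfl | rfl | rfl | rfl | rfl | rfl | rfl | rfl
      · exact absurd (m0.mp hy) h0
      · exact absurd (m1.mp hy) h1
      · exact absurd (m2.mp hy) h2
      · exact absurd (m3.mp hy) h3
      · exact absurd (m4.mp hy) h4
      · exact absurd (m5.mp hy) h5
      · exact absurd (m6.mp hy) h6
      · norm_num
      · norm_num
    · intro c hc
      simp only [pvPairs, List.mem_cons, List.not_mem_nil, or_false, Prod.mk.injEq] at hc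
      norm_num at hc
      exact hc
  rw [if_neg h7]
  by_cases h8 : (PySem.Str.isIn "tire" ml || PySem.Str.isIn "rubber" ml) = true
  · rw [if_pos h8]
    refine (pick (pvCands ml) 8 "rubber" hsub (m8.mpr h8) ?_ ?_).symm
    · intro y hy
      have hyp := hsub y hy
      simp only [pvPairs, List.mem_cons, List.not_mem_nil, or_false] at hyp
      rcases hyp with rfl | rfl | rfl | rfl | rfl | rfl | rfl | rfl | rfl
      · exact absurd (m0.mp hy) h0
      · exact absurd (m1.mp hy) h1
      · exact absurd (m2.mp hy) h2
      · exact absurd (m3.mp hy) h3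
      · exact absurd (m4.mp hy) h4
      · exact absurd (m5.mp hy) h5
      · exact absurd (m6.mp hy) h6
      · exact absurd (m7.mp hy) h7
      · norm_num
    · intro c hc
      simp only [pvPairs, List.mem_cons, List.not_mem_nil, or_false, Prod.mk.injEq] at hc
      norm_num at hc
      exact hc
  rw [if_neg h8]
  have hnil : pvCands ml = [] := by
    rw [List.eq_nil_iff_forall_not_mem]
    intro y hy
    have hyp := hsub y hy
    simp only [pvPairs, List.mem_cons, List.not_mem_nil, or_false] at hyp
    rcases hyp with rfl | rfl | rfl | rfl | rfl | rfl | rfl | rfl | rfl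
    · exact absurd (m0.mp hy) h0
    · exact absurd (m1.mp hy) h1
    · exact absurd (m2.mp hy) h2
    · exact absurd (m3.mp hy) h3
    · exact absurd (m4.mp hy) h4
    · exact absurd (m5.mp hy) h5
    · exact absurd (m6.mp hy) h6
    · exact absurd (m7.mp hy) h7
    · exact absurd (m8.mp hy) h8
  rw [hnil]
  rfl

-- ===== VERDICT (by name: the statement is the Claim_ definition above) =====
theorem categorize_material_py_spec : Claim_equal_categorize_material_py := by
  intro material _
  unfold Spec_categorize_material_py
  exact pv_main material
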